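-- pv_equiv track=rewrite | github.com/maruel/bin_pub | rsync.py | bash_escape
-- ===== SOURCE A (Python) =====
-- import string
--
-- def bash_escape(arg):
--   """Escapes each character individually."""
--   out = []
--   allowed = string.digits + string.ascii_letters
--   for i in arg:
--     if i in allowed:
--       out.append(i)
--     else:
--       # Escape anything else. Note this includes all UTF-8 characters and '/'
--       # but "this works".
--       out.append('\\' + i)
--   return ''.join(out)
-- ===== SOURCE B (Python) =====
-- import re
--
-- def bash_escape(arg):
--   """Escapes each character individually."""
--   return re.sub(r'[^0-9A-Za-z]', lambda m: '\\' + m.group(0), arg)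
-- ===== Notes on version B (the rewrite author's own statement) =====
-- stated objective: idiomatic
-- what changed: The explicit per-character loop with a list accumulator and membership test against a 62-char string is replaced by a single regex substitution re.sub(r'[^0-9A-Za-z]', ...) whose callback prepends a backslash.
import Mathlib
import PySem

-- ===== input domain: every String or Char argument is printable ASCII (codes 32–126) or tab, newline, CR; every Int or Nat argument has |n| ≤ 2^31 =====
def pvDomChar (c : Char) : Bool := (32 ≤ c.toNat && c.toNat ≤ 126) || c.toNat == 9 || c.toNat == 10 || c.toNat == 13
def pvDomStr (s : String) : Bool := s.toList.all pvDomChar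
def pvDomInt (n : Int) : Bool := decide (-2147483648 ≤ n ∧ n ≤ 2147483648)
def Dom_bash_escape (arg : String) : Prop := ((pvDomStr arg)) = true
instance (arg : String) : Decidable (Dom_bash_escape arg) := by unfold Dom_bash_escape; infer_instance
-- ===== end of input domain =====

-- B replaces the explicit accumulator loop by a single regex-style substitution (one re.sub pass); idiomatic, same behaviour.

-- ===== PORT A =====
-- A: loop over chars, append either the char or '\' + char to a list, join at the end.
def bash_escape (arg : String) : String :=
  let allowed := ("0123456789abcdefghijklmnopqrstuvwxyzABCDEFGHIJKLMNOPQRSTUVWXYZ").toList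
  let out := arg.toList.foldl
    (fun out i =>
      if allowed.contains i then out ++ [String.ofList [i]]
      else out ++ ["\\" ++ String.ofList [i]]) []
  String.join out

-- ===== PORT B =====
-- B: re.sub(r'[^0-9A-Za-z]', lambda m: '\\' + m.group(0), arg): the regex engine scans the
-- string once, replacing each char outside the class 0-9A-Za-z by '\' + that char.
-- Ported as one flatMap over the characters; the class test is the three ASCII ranges.
def pvInClass (c : Char) : Bool :=
  ('0' ≤ c && c ≤ '9') || ('A' ≤ c && c ≤ 'Z') || ('a' ≤ c && c ≤ 'z')

def bash_escape_alt (arg : String) : String :=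
  String.ofList (arg.toList.flatMap (fun c => if pvInClass c then [c] else ['\\', c]))

-- ===== PRECONDITION & SPEC =====
def Spec_bash_escape (arg : String) (out : String) : Prop := out = bash_escape_alt arg
instance (arg : String) (out : String) : Decidable (Spec_bash_escape arg out) := by unfold Spec_bash_escape; infer_instance

-- ===== CLAIM (what is proved, stated in full; the proofs are below) =====
def Claim_equal_bash_escape : Prop := ∀ (arg : String), Dom_bash_escape arg → Spec_bash_escape arg (bash_escape arg)

-- ===== LEMMAS AND PROOFS =====

lemma char_toNat_injective : Function.Injective Char.toNat := fun a b h => by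
  rw [← Char.ofNat_toNat a, ← Char.ofNat_toNat b, h]

lemma contains_allowed_eq (c : Char) :
    (("0123456789abcdefghijklmnopqrstuvwxyzABCDEFGHIJKLMNOPQRSTUVWXYZ").toList.contains c)
      = pvInClass c := by
  have h2 : ("0123456789abcdefghijklmnopqrstuvwxyzABCDEFGHIJKLMNOPQRSTUVWXYZ").toList.map Char.toNat
      = [48,49,50,51,52,53,54,55,56,57,97,98,99,100,101,102,103,104,105,106,107,108,109,110,111,112,113,114,115,116,117,118,119,120,121,122,65,66,67,68,69,70,71,72,73,74,75,76,77,78,79,80,81,82,83,84,85,86,87,88,89,90] := by rfl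
  rw [Bool.eq_iff_iff, List.contains_iff_mem,
    ← List.mem_map_of_injective char_toNat_injective
      (l := ("0123456789abcdefghijklmnopqrstuvwxyzABCDEFGHIJKLMNOPQRSTUVWXYZ").toList), h2]
  simp only [List.mem_cons, List.not_mem_nil, or_false, pvInClass, Bool.or_eq_true,
    Bool.and_eq_true, decide_eq_true_eq, Char.le_def, UInt32.le_iff_toNat_le, Char.toNat,
    show ('0'.val.toNat = 48) from rfl, show ('9'.val.toNat = 57) from rfl,
    show ('A'.val.toNat = 65) from rfl, show ('Z'.val.toNat = 90) from rfl,
    show ('a'.val.toNat = 97) from rfl, show ('z'.val.toNat = 122) from rfl]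
  omega

lemma join_append_one (acc : List String) (s : String) :
    String.join (acc ++ [s]) = String.join acc ++ s := by
  simp [String.join, List.foldl_append]

lemma join_foldl (l : List Char) (acc : List String) :
    String.join (l.foldl
      (fun out i =>
        if pvInClass i
        then out ++ [String.ofList [i]]
        else out ++ ["\\" ++ String.ofList [i]]) acc)
    = String.join acc ++ String.ofList (l.flatMap (fun c => if pvInClass c then [c] else ['\\', c])) := by
  induction l generalizing acc with
  | nil => simp [show String.ofList ([] : List Char) = "" from rfl]
  | cons c l ih =>
    simp only [List.foldl_cons, List.flatMap_cons]
    by_cases h : pvInClass c = true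
    · rw [if_pos h, if_pos h, ih, join_append_one, String.ofList_append, String.append_assoc]
    · rw [if_neg h, if_neg h, ih, join_append_one, String.ofList_append, String.append_assoc]
      congr 2
      rw [show (['\\', c] : List Char) = ['\\'] ++ [c] from rfl, String.ofList_append]

-- ===== VERDICT (by name: the statement is the Claim_ definition above) =====
theorem bash_escape_spec : Claim_equal_bash_escape := by
  intro arg _
  unfold Spec_bash_escape bash_escape bash_escape_alt
  simp only [contains_allowed_eq]
  rw [join_foldl arg.toList []]
  simp [String.join]
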